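-- pv_equiv track=rewrite | github.com/KS-HTK/adventOfCode24 | day07/day07.py | part1
-- ===== SOURCE A (Python) =====
-- from functools import reduce
-- from operator import mul
-- import itertools
-- from typing import Literal
--
-- def caculate_total(nums: list[int], ops: tuple[Literal['+', '*', '|']], expected_result: int) -> int:
--     total = nums[0]
--     for i, op in enumerate(ops):
--         match op:
--             case '+':
--                 total += nums[i+1]
--             case '*':
--                 total *= nums[i+1]
--             case '|':
--                 total = int(str(total) + str(nums[i+1]))
--         if total > expected_result:
--             return 0
--     return total
--
-- def part1(content = None) -> str|int:
--     test_total = 0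
--     for res, lst in content:
--         if sum(lst) == res or reduce(mul, lst) == res:
--             test_total += res
--             continue
--         operator_options: list[tuple[Literal['*', '+']]] = list(itertools.product(['+', '*'], repeat=len(lst)-1))
--         for ops in operator_options:
--             ct = caculate_total(lst, ops, res)
--             if ct == res:
--                 test_total += ct
--                 break
--     return test_total
-- ===== SOURCE B (Python) =====
-- def part1(content=None):
--     # Incremental deduped reachable-set per row, pruning values > target
--     # (which matches the search's early cutoff): no enumeration of all
--     # 2^(n-1) operator tuples.
--     total = 0
--     for res, lst in content:
--         s = 0
--         for x in lst:
--             s += x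
--         if s == res:
--             total += res
--             continue
--         p = lst[0]
--         for x in lst[1:]:
--             p *= x
--         if p == res:
--             total += res
--             continue
--         reach = {lst[0]}
--         for x in lst[1:]:
--             reach = {v for t in reach for v in (t + x, t * x) if v <= res}
--         if res in reach:
--             total += res
--     return total
-- ===== Notes on version B (the rewrite author's own statement) =====
-- stated objective: faster
-- what changed: Instead of enumerating all 2^(n-1) operator tuples and re-evaluating each from scratch, B sweeps once over the numbers keeping a deduplicated set of reachable totals, dropping totals above the target exactly as A's early cutoff does.
import Mathlib
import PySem

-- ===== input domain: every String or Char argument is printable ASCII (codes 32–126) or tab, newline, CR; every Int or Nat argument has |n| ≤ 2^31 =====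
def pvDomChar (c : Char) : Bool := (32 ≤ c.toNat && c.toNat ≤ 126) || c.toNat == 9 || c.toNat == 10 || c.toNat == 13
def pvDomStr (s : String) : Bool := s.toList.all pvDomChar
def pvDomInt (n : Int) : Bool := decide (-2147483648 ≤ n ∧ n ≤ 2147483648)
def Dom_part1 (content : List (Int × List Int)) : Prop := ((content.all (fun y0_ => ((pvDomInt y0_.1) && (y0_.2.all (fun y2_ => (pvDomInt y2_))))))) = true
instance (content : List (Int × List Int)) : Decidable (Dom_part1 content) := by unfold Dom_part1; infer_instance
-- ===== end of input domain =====

-- B replaces A's enumeration of all 2^(n-1) operator tuples by one sweep keeping a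
-- deduplicated set of reachable totals (dropping totals above the target, exactly as
-- A's early cutoff does); measured faster on the generated timing inputs.

-- ===== PORT A =====
-- caculate_total's loop: i is the enumerate index; nums[i+1] via pyGet? (in range on
-- every call part1 makes; the .getD 0 default is never used there).  A Python match
-- with no applicable case leaves total unchanged, which the final `else` mirrors; the
-- '|' arm is not ported since part1's itertools.product(['+','*'], ...) never yields '|'.
def caculateGo (nums : List Int) (expected : Int) : List Char → Nat → Int → Int
  | [], _, total => total
  | op :: rest, i, total =>
    let x := (PySem.List.pyGet? nums ((i : Int) + 1)).getD 0
    let total' := if op = '+' then total + x else if op = '*' then total * x else total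
    if expected < total' then 0 else caculateGo nums expected rest (i + 1) total'

-- total = nums[0]; on empty nums Python raises IndexError (excluded by Pre_part1)
def caculate_total (nums : List Int) (ops : List Char) (expected : Int) : Int :=
  caculateGo nums expected ops 0 ((PySem.List.pyGet? nums 0).getD 0)

-- list(itertools.product(['+', '*'], repeat=n)) (leftmost position varies slowest)
def opProduct : Nat → List (List Char)
  | 0 => [[]]
  | n + 1 => ['+', '*'].flatMap (fun c => (opProduct n).map (fun o => c :: o))

-- the inner 'for ops in operator_options: … break' loop: first ct with ct == res
def tryOps (lst : List Int) (res : Int) : List (List Char) → Option Int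
  | [] => none
  | ops :: rest =>
    let ct := caculate_total lst ops res
    if ct = res then some ct else tryOps lst res rest

-- reduce(mul, []) raises TypeError in Python; that input is excluded by Pre_part1,
-- so the [] arm of the reduce match is never reached under the claim.
def part1 (content : List (Int × List Int)) : Int :=
  content.foldl (fun tt rl =>
    let res := rl.1
    let lst := rl.2
    if lst.sum = res ∨ (match lst with | [] => (0 : Int) | h :: t => t.foldl (· * ·) h) = res then
      tt + res
    else
      match tryOps lst res (opProduct (lst.length - 1)) with
      | some ct => tt + ct
      | none => tt) 0

-- ===== PORT B =====
def part1_alt (content : List (Int × List Int)) : Int :=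
  content.foldl (fun tt rl =>
    let res := rl.1
    let lst := rl.2
    let s := lst.foldl (· + ·) 0
    if s = res then tt + res
    else
      match lst with
      | [] => tt   -- Source B raises IndexError here (lst[0]); excluded by Pre_part1
      | h :: t =>
        let p := t.foldl (· * ·) h
        if p = res then tt + res
        else
          let reach := t.foldl (fun (r : PySem.Set Int) x =>
            PySem.Set.ofList ((r.flatMap (fun v => [v + x, v * x])).filter (fun v => v ≤ res)))
            (PySem.Set.ofList [h])
          if res ∈ reach then tt + res else tt) 0

-- ===== PRECONDITION & SPEC =====
-- Pre_ excludes rows with an empty number list and a nonzero target: there A raises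
-- TypeError (reduce of empty sequence) and Source B raises IndexError (lst[0]).
def Pre_part1 (content : List (Int × List Int)) : Prop :=
  ∀ rl ∈ content, rl.2 ≠ [] ∨ rl.1 = 0
instance (content : List (Int × List Int)) : Decidable (Pre_part1 content) := by
  unfold Pre_part1; infer_instance

def pvWitness_part1 : (List (Int × List Int)) := [(3, [1, 2]), (190, [10, 19]), (0, [])]

def Spec_part1 (content : List (Int × List Int)) (out : Int) : Prop := out = part1_alt content
instance (content : List (Int × List Int)) (out : Int) : Decidable (Spec_part1 content out) := by
  unfold Spec_part1; infer_instance

-- ===== CLAIM (what is proved, stated in full; the proofs are below) =====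
def Claim_equal_part1 : Prop :=
  ∀ (content : List (Int × List Int)), Dom_part1 content → Pre_part1 content →
    Spec_part1 content (part1 content)

-- ===== LEMMAS AND PROOFS =====

-- the two fold bodies of the ports, named so the per-row lemma can be stated cleanly
def pvBodyA (tt : Int) (rl : Int × List Int) : Int :=
  let res := rl.1
  let lst := rl.2
  if lst.sum = res ∨ (match lst with | [] => (0 : Int) | h :: t => t.foldl (· * ·) h) = res then
    tt + res
  else
    match tryOps lst res (opProduct (lst.length - 1)) with
    | some ct => tt + ct
    | none => tt

def pvBodyB (tt : Int) (rl : Int × List Int) : Int :=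
  let res := rl.1
  let lst := rl.2
  let s := lst.foldl (· + ·) 0
  if s = res then tt + res
  else
    match lst with
    | [] => tt
    | h :: t =>
      let p := t.foldl (· * ·) h
      if p = res then tt + res
      else
        let reach := t.foldl (fun (r : PySem.Set Int) x =>
          PySem.Set.ofList ((r.flatMap (fun v => [v + x, v * x])).filter (fun v => v ≤ res)))
          (PySem.Set.ofList [h])
        if res ∈ reach then tt + res else tt

-- proof-side view of caculateGo: evaluation of one operator word along the tail of
-- the number list, with the index replaced by structural recursion on the tail
def pathVal (res : Int) : Int → List Char → List Int → Int
  | total, [], _ => total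
  | total, _ :: _, [] => total
  | total, op :: ops, x :: xs =>
    let t' := if op = '+' then total + x else if op = '*' then total * x else total
    if res < t' then 0 else pathVal res t' ops xs

-- all never-pruned final totals reachable from `total` over the tail
def states (res : Int) : Int → List Int → List Int
  | total, [] => [total]
  | total, x :: xs =>
    (if total + x ≤ res then states res (total + x) xs else []) ++
    (if total * x ≤ res then states res (total * x) xs else [])

theorem pathVal_plus (res total x : Int) (ops : List Char) (xs : List Int) :
    pathVal res total ('+' :: ops) (x :: xs) =
      if res < total + x then 0 else pathVal res (total + x) ops xs := by
  simp [pathVal]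

theorem pathVal_star (res total x : Int) (ops : List Char) (xs : List Int) :
    pathVal res total ('*' :: ops) (x :: xs) =
      if res < total * x then 0 else pathVal res (total * x) ops xs := by
  simp [pathVal]

theorem tryOps_some_eq {lst : List Int} {res : Int} :
    ∀ {l : List (List Char)} {ct : Int}, tryOps lst res l = some ct → ct = res := by
  intro l
  induction l with
  | nil => intro ct h; simp [tryOps] at h
  | cons ops rest ih =>
    intro ct h
    simp only [tryOps] at h
    split at h
    · rename_i hv; cases h; exact hv
    · exact ih h

theorem tryOps_isSome_iff (lst : List Int) (res : Int) (l : List (List Char)) :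
    (tryOps lst res l).isSome ↔ ∃ ops ∈ l, caculate_total lst ops res = res := by
  induction l with
  | nil => simp [tryOps]
  | cons ops rest ih =>
    simp only [tryOps]
    split
    · rename_i hv
      simp only [Option.isSome_some, true_iff]
      exact ⟨ops, by simp, hv⟩
    · rename_i hv
      rw [ih]
      constructor
      · rintro ⟨o, ho, h⟩; exact ⟨o, List.mem_cons_of_mem _ ho, h⟩
      · rintro ⟨o, ho, h⟩
        rcases List.mem_cons.mp ho with rfl | ho'
        · exact absurd h hv
        · exact ⟨o, ho', h⟩

theorem opProduct_mem_length {n : Nat} {ops : List Char} (h : ops ∈ opProduct n) :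
    ops.length = n := by
  induction n generalizing ops with
  | zero => simp [opProduct] at h; simp [h]
  | succ m ih =>
    simp only [opProduct, List.mem_flatMap, List.mem_map] at h
    obtain ⟨c, _, o, ho, rfl⟩ := h
    simp [ih ho]

theorem caculateGo_eq (res : Int) :
    ∀ (ops : List Char) (nums : List Int) (i : Nat) (total : Int),
      ops.length ≤ (nums.drop (i + 1)).length →
      caculateGo nums res ops i total = pathVal res total ops (nums.drop (i + 1)) := by
  intro ops
  induction ops with
  | nil => intro nums i total _; cases nums.drop (i + 1) <;> rfl
  | cons op rest ih =>
    intro nums i total hlen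
    cases hd : nums.drop (i + 1) with
    | nil => rw [hd] at hlen; simp at hlen
    | cons x xs =>
      have hx : nums[i + 1]? = some x := by
        rw [← List.head?_drop, hd]; rfl
      have hget : PySem.List.pyGet? nums ((i : Int) + 1) = some x := by
        have hcast : ((i : Int) + 1) = ((i + 1 : Nat) : Int) := by push_cast; ring
        rw [hcast, PySem.List.pyGet?_natCast, hx]
      have hd2 : nums.drop (i + 1 + 1) = xs := by
        rw [show i + 1 + 1 = (i + 1) + 1 from rfl, ← List.drop_drop, hd]; rfl
      have hlen' : rest.length ≤ (nums.drop (i + 1 + 1)).length := by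
        rw [hd2]; rw [hd] at hlen; simpa using hlen
      simp only [caculateGo, hget, Option.getD_some, pathVal]
      by_cases hlt : res < (if op = '+' then total + x else if op = '*' then total * x else total)
      · rw [if_pos hlt, if_pos hlt]
      · rw [if_neg hlt, if_neg hlt, ih nums (i + 1) _ hlen', hd2]

theorem pathVal_exists_iff (res : Int) (hres : res ≠ 0) :
    ∀ (xs : List Int) (total : Int),
      (∃ ops ∈ opProduct xs.length, pathVal res total ops xs = res) ↔
        res ∈ states res total xs := by
  intro xs
  induction xs with
  | nil =>
    intro total
    simp [opProduct, pathVal, states, eq_comm]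
  | cons x xs ih =>
    intro total
    constructor
    · rintro ⟨ops, hmem, hval⟩
      simp only [List.length_cons, opProduct, List.mem_flatMap, List.mem_map,
        List.mem_cons, List.not_mem_nil, or_false] at hmem
      obtain ⟨c, hc, o, ho, rfl⟩ := hmem
      simp only [states, List.mem_append]
      rcases hc with rfl | rfl
      · rw [pathVal_plus] at hval
        by_cases hlt : res < total + x
        · rw [if_pos hlt] at hval
          exact absurd hval.symm hres
        · rw [if_neg hlt] at hval
          left
          rw [if_pos (not_lt.mp hlt)]
          exact (ih (total + x)).mp ⟨o, ho, hval⟩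
      · rw [pathVal_star] at hval
        by_cases hlt : res < total * x
        · rw [if_pos hlt] at hval
          exact absurd hval.symm hres
        · rw [if_neg hlt] at hval
          right
          rw [if_pos (not_lt.mp hlt)]
          exact (ih (total * x)).mp ⟨o, ho, hval⟩
    · intro hmem
      simp only [states, List.mem_append] at hmem
      rcases hmem with hmem | hmem
      · by_cases hle : total + x ≤ res
        · rw [if_pos hle] at hmem
          obtain ⟨o, ho, hv⟩ := (ih (total + x)).mpr hmem
          refine ⟨'+' :: o, ?_, ?_⟩
          · simp only [List.length_cons, opProduct, List.mem_flatMap, List.mem_map]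
            exact ⟨'+', by simp, o, ho, rfl⟩
          · rw [pathVal_plus, if_neg (not_lt.mpr hle)]
            exact hv
        · rw [if_neg hle] at hmem; simp at hmem
      · by_cases hle : total * x ≤ res
        · rw [if_pos hle] at hmem
          obtain ⟨o, ho, hv⟩ := (ih (total * x)).mpr hmem
          refine ⟨'*' :: o, ?_, ?_⟩
          · simp only [List.length_cons, opProduct, List.mem_flatMap, List.mem_map]
            exact ⟨'*', by simp, o, ho, rfl⟩
          · rw [pathVal_star, if_neg (not_lt.mpr hle)]
            exact hv
        · rw [if_neg hle] at hmem; simp at hmem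

theorem reach_iff (res : Int) :
    ∀ (xs : List Int) (S : PySem.Set Int),
      res ∈ xs.foldl (fun (r : PySem.Set Int) x =>
          PySem.Set.ofList ((r.flatMap (fun v => [v + x, v * x])).filter (fun v => v ≤ res))) S ↔
        ∃ t ∈ S, res ∈ states res t xs := by
  intro xs
  induction xs with
  | nil =>
    intro S
    simp [states]
  | cons x xs ih =>
    intro S
    rw [List.foldl_cons, ih]
    constructor
    · rintro ⟨t', ht', hst⟩
      rw [PySem.Set.mem_ofList] at ht'
      simp only [List.mem_filter, List.mem_flatMap, List.mem_cons, List.not_mem_nil,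
        or_false, decide_eq_true_eq] at ht'
      obtain ⟨⟨t, htS, hcase⟩, hle⟩ := ht'
      refine ⟨t, htS, ?_⟩
      simp only [states, List.mem_append]
      rcases hcase with rfl | rfl
      · left; rw [if_pos hle]; exact hst
      · right; rw [if_pos hle]; exact hst
    · rintro ⟨t, htS, hst⟩
      simp only [states, List.mem_append] at hst
      rcases hst with h1 | h1
      · by_cases hle : t + x ≤ res
        · rw [if_pos hle] at h1
          refine ⟨t + x, ?_, h1⟩
          rw [PySem.Set.mem_ofList]
          simp only [List.mem_filter, List.mem_flatMap, decide_eq_true_eq]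
          exact ⟨⟨t, htS, by simp⟩, hle⟩
        · rw [if_neg hle] at h1; simp at h1
      · by_cases hle : t * x ≤ res
        · rw [if_pos hle] at h1
          refine ⟨t * x, ?_, h1⟩
          rw [PySem.Set.mem_ofList]
          simp only [List.mem_filter, List.mem_flatMap, decide_eq_true_eq]
          exact ⟨⟨t, htS, by simp⟩, hle⟩
        · rw [if_neg hle] at h1; simp at h1

theorem row_eq (tt res : Int) (lst : List Int) (hpre : lst ≠ [] ∨ res = 0) :
    pvBodyA tt (res, lst) = pvBodyB tt (res, lst) := by
  unfold pvBodyA pvBodyB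
  cases lst with
  | nil =>
    rcases hpre with hne | rfl
    · exact absurd rfl hne
    · simp
  | cons h t =>
    simp only [List.sum_eq_foldl]
    by_cases hs : List.foldl (· + ·) 0 (h :: t) = res
    · simp [hs]
    · by_cases hp : t.foldl (· * ·) h = res
      · simp [hp]
      · have hcond : ¬ (List.foldl (· + ·) 0 (h :: t) = res ∨
            (match h :: t with | [] => (0 : Int) | h :: t => t.foldl (· * ·) h) = res) := by
          simp only [not_or]
          exact ⟨hs, hp⟩
        simp only [if_neg hcond, if_neg hs, if_neg hp, List.length_cons, Nat.add_sub_cancel]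
        by_cases hres : res = 0
        · -- target 0: A adds ct = 0 or nothing, B adds 0 or nothing; both leave tt
          subst hres
          have hA : (match tryOps (h :: t) 0 (opProduct t.length) with
              | some ct => tt + ct
              | none => tt) = tt := by
            cases htry : tryOps (h :: t) 0 (opProduct t.length) with
            | none => rfl
            | some ct =>
              have h0 := tryOps_some_eq htry
              subst h0
              simp
          rw [hA]
          split
          · simp
          · rfl
        · -- core equivalence: A's exhaustive search finds res iff B's reachable set holds it
          have hcalc : ∀ ops ∈ opProduct t.length,
              caculate_total (h :: t) ops res = pathVal res h ops t := by
            intro ops ho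
            have hget0 : PySem.List.pyGet? (h :: t) (0 : Int) = some h := by
              simp [PySem.List.pyGet?, PySem.List.pyIdx?]
            have hlen : ops.length ≤ ((h :: t).drop (0 + 1)).length := by
              simp [opProduct_mem_length ho]
            unfold caculate_total
            rw [hget0, Option.getD_some, caculateGo_eq res ops (h :: t) 0 h hlen]
            rfl
          have hiff : (tryOps (h :: t) res (opProduct t.length)).isSome ↔
              res ∈ t.foldl (fun (r : PySem.Set Int) x =>
                PySem.Set.ofList ((r.flatMap (fun v => [v + x, v * x])).filter (fun v => v ≤ res)))
                (PySem.Set.ofList [h]) := by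
            rw [tryOps_isSome_iff]
            have h1 : (∃ ops ∈ opProduct t.length, caculate_total (h :: t) ops res = res) ↔
                (∃ ops ∈ opProduct t.length, pathVal res h ops t = res) := by
              constructor
              · rintro ⟨o, ho, hv⟩; exact ⟨o, ho, by rw [← hcalc o ho]; exact hv⟩
              · rintro ⟨o, ho, hv⟩; exact ⟨o, ho, by rw [hcalc o ho]; exact hv⟩
            rw [h1, pathVal_exists_iff res hres t h, reach_iff res t (PySem.Set.ofList [h])]
            constructor
            · intro hm; exact ⟨h, by rw [PySem.Set.mem_ofList]; simp, hm⟩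
            · rintro ⟨t0, ht0, hm⟩
              rw [PySem.Set.mem_ofList] at ht0
              simp only [List.mem_cons, List.not_mem_nil, or_false] at ht0
              subst ht0
              exact hm
          cases htry : tryOps (h :: t) res (opProduct t.length) with
          | none =>
            have hns : ¬ (tryOps (h :: t) res (opProduct t.length)).isSome := by
              rw [htry]; simp
            have hnm := fun hm => hns (hiff.mpr hm)
            rw [if_neg hnm]
          | some ct =>
            have hct := tryOps_some_eq htry
            have hm : res ∈ _ := hiff.mp (by rw [htry]; rfl)
            rw [if_pos hm, hct]

-- ===== VERDICT (by name: the statement is the Claim_ definition above) =====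
theorem part1_spec : Claim_equal_part1 := by
  intro content _ hpre
  unfold Spec_part1 part1 part1_alt
  apply PySem.List.foldl_congr_mem
  intro tt rl hrl
  obtain ⟨res, lst⟩ := rl
  exact row_eq tt res lst (hpre _ hrl)
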